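-- pv_equiv track=rewrite | github.com/iitkgpvivek/ai-math-tutor | integer_word_problem_generators.py | _find_smallest_number_greater_than
-- ===== SOURCE A (Python) =====
-- def _find_smallest_number_greater_than(n: int, a: int, rem_a: int, b: int, rem_b: int) -> int:
--     """Find the smallest number > n that leaves remainder rem_a when divided by a and rem_b when divided by b."""
--     x = n + 1
--     while True:
--         if x % a == rem_a and x % b == rem_b:
--             return x
--         x += 1
--         # Safety check to prevent infinite loops
--         if x > n + 1000:
--             return -1
-- ===== SOURCE B (Python) =====
-- def _find_smallest_number_greater_than(n: int, a: int, rem_a: int, b: int, rem_b: int) -> int: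
--     """Same window [n+1, n+1000] and -1 fallback as the original, but strides by |a|
--     over the arithmetic progression of candidates x with x % a == rem_a instead of
--     testing every integer."""
--     if rem_a % a != rem_a:
--         # no integer has x % a == rem_a (rem_a is not a canonical residue mod a)
--         return -1
--     x = (n + 1) + (rem_a - (n + 1)) % abs(a)
--     while x <= n + 1000:
--         if x % b == rem_b:
--             return x
--         x += abs(a)
--     return -1
-- ===== Notes on version B (the rewrite author's own statement) =====
-- stated objective: faster
-- what changed: Instead of testing every integer in (n, n+1000], B computes the first aligned candidate x = (n+1) + (rem_a-(n+1)) % |a| (after rejecting non-canonical rem_a outright) and strides through the window in steps of |a|, testing only x % b.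
import Mathlib
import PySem

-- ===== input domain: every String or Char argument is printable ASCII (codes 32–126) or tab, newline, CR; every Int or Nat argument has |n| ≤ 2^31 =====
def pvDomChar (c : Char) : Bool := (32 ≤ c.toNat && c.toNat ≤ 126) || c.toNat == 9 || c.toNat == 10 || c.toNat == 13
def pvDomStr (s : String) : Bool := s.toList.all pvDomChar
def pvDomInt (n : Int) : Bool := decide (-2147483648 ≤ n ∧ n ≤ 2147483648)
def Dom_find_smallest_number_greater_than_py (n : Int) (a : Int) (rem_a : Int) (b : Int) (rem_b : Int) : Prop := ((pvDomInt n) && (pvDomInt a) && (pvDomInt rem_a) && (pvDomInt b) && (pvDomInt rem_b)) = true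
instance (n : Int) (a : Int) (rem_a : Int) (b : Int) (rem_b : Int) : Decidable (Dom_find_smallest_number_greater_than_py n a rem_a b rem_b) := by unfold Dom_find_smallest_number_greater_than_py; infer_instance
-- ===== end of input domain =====

-- B replaces A's unit-step scan of (n, n+1000] by a stride-|a| scan over the aligned
-- candidates x with x % a == rem_a, starting from a computed aligned start (objective: faster).


-- ===== PORT A =====
-- A's `while True` loop: test x, increment, bail out with -1 once x passes n + 1000.
def pyA_loop (n a rem_a b rem_b x : Int) : Int :=
  if PySem.Int.mod x a = rem_a ∧ PySem.Int.mod x b = rem_b then x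
  else if x + 1 > n + 1000 then -1
  else pyA_loop n a rem_a b rem_b (x + 1)
termination_by (n + 1001 - x).toNat
decreasing_by omega

def find_smallest_number_greater_than_py (n : Int) (a : Int) (rem_a : Int) (b : Int) (rem_b : Int) : Int :=
  pyA_loop n a rem_a b rem_b (n + 1)

-- ===== PORT B =====
-- B's stride loop `while x <= n + 1000: … x += abs(a)`; the fuel 1001 is never exhausted
-- when a ≠ 0 (each step advances x by |a| ≥ 1 through a window of 1000 integers).
def pyB_loop (n b rem_b step x : Int) : Nat → Int
  | 0 => -1
  | fuel + 1 =>
    if x ≤ n + 1000 then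
      if PySem.Int.mod x b = rem_b then x
      else pyB_loop n b rem_b step (x + step) fuel
    else -1

def find_smallest_number_greater_than_py_alt (n : Int) (a : Int) (rem_a : Int) (b : Int) (rem_b : Int) : Int :=
  if PySem.Int.mod rem_a a ≠ rem_a then -1
  else pyB_loop n b rem_b |a| ((n + 1) + PySem.Int.mod (rem_a - (n + 1)) |a|) 1001

-- ===== PRECONDITION & SPEC =====
-- Pre_ excludes exactly the inputs on which the Python A raises ZeroDivisionError (so returns
-- nothing): a = 0, or b = 0 while some x in (n, n+1000] has x % a == rem_a (i.e. rem_a is a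
-- canonical residue mod a and the aligned start lies inside the window).
def Pre_find_smallest_number_greater_than_py (n : Int) (a : Int) (rem_a : Int) (b : Int) (rem_b : Int) : Prop :=
  a ≠ 0 ∧ (b ≠ 0 ∨ ¬(PySem.Int.mod rem_a a = rem_a ∧ PySem.Int.mod (rem_a - (n + 1)) |a| ≤ 999))
instance (n : Int) (a : Int) (rem_a : Int) (b : Int) (rem_b : Int) : Decidable (Pre_find_smallest_number_greater_than_py n a rem_a b rem_b) := by unfold Pre_find_smallest_number_greater_than_py; infer_instance

def pvWitness_find_smallest_number_greater_than_py : Int × Int × Int × Int × Int := (10, 7, 3, 5, 2)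

def Spec_find_smallest_number_greater_than_py (n : Int) (a : Int) (rem_a : Int) (b : Int) (rem_b : Int) (out : Int) : Prop := out = find_smallest_number_greater_than_py_alt n a rem_a b rem_b
instance (n : Int) (a : Int) (rem_a : Int) (b : Int) (rem_b : Int) (out : Int) : Decidable (Spec_find_smallest_number_greater_than_py n a rem_a b rem_b out) := by unfold Spec_find_smallest_number_greater_than_py; infer_instance

-- ===== CLAIM (what is proved, stated in full; the proofs are below) =====
def Claim_equal_find_smallest_number_greater_than_py : Prop := ∀ (n : Int) (a : Int) (rem_a : Int) (b : Int) (rem_b : Int), Dom_find_smallest_number_greater_than_py n a rem_a b rem_b → Pre_find_smallest_number_greater_than_py n a rem_a b rem_b → Spec_find_smallest_number_greater_than_py n a rem_a b rem_b (find_smallest_number_greater_than_py n a rem_a b rem_b)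

-- ===== LEMMAS AND PROOFS =====

-- a % c is congruent to a modulo c
theorem pv_mod_dvd (x c : Int) : c ∣ (x - PySem.Int.mod x c) := by
  exact ⟨PySem.Int.floordiv x c, by
    have h := PySem.Int.floordiv_mul_add_mod x c
    have := mul_comm c (PySem.Int.floordiv x c)
    linarith⟩

-- Python's bounds for %: the result carries the sign of the divisor
theorem pv_mod_bounds (x c : Int) :
    (0 < c → 0 ≤ PySem.Int.mod x c ∧ PySem.Int.mod x c < c) ∧
    (c < 0 → c < PySem.Int.mod x c ∧ PySem.Int.mod x c ≤ 0) :=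
  ⟨fun h => ⟨PySem.Int.mod_nonneg x h, PySem.Int.mod_lt x h⟩,
   fun h => PySem.Int.mod_neg_bounds x h⟩

-- % is determined by congruence together with Python's bounds
theorem pv_mod_unique (x c r : Int) (hc : c ≠ 0) (hd : c ∣ (x - r))
    (hpos : 0 < c → 0 ≤ r ∧ r < c) (hneg : c < 0 → c < r ∧ r ≤ 0) :
    PySem.Int.mod x c = r := by
  have hdm := pv_mod_dvd x c
  have h2 : c ∣ (PySem.Int.mod x c - r) := by
    have h3 := dvd_sub hd hdm
    have e : (x - r) - (x - PySem.Int.mod x c) = PySem.Int.mod x c - r := by ring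
    rwa [e] at h3
  have hb := pv_mod_bounds x c
  have h0 : PySem.Int.mod x c - r = 0 := by
    refine Int.eq_zero_of_dvd_of_natAbs_lt_natAbs h2 ?_
    rcases lt_or_gt_of_ne hc with h | h
    · have := hb.2 h; have := hneg h; omega
    · have := hb.1 h; have := hpos h; omega
  omega

-- skipping an unaligned run of length c inside A's loop
theorem pyA_skip (n a rem_a b rem_b : Int) (c : Nat) :
    ∀ x : Int, (∀ j : Nat, j < c → PySem.Int.mod (x + j) a ≠ rem_a) → x ≤ n + 1000 →
      pyA_loop n a rem_a b rem_b x =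
        (if x + (c : Int) ≤ n + 1000 then pyA_loop n a rem_a b rem_b (x + c) else -1) := by
  induction c with
  | zero => intro x _ hx; simp [hx]
  | succ c ih =>
    intro x h hx
    have h0 : PySem.Int.mod x a ≠ rem_a := by
      have := h 0 (by omega); simpa using this
    rw [pyA_loop, if_neg (by tauto)]
    by_cases hx1 : x + 1 > n + 1000
    · rw [if_pos hx1, if_neg (by push_cast; omega)]
    · rw [if_neg hx1]
      have hrec := ih (x + 1)
        (fun j hj => by
          have := h (j + 1) (by omega)
          have e : x + ((j : Int) + 1) = x + 1 + (j : Int) := by ring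
          rw [Nat.cast_add, Nat.cast_one, e] at this
          exact this)
        (by omega)
      rw [hrec, show x + 1 + (c : Int) = x + ((c : Nat) + 1 : Int) by ring,
          show ((c + 1 : Nat) : Int) = ((c : Nat) + 1 : Int) by push_cast; ring]

theorem pyB_loop_gt (n b rem_b step x : Int) (fuel : Nat) (h : n + 1000 < x) :
    pyB_loop n b rem_b step x fuel = -1 := by
  cases fuel <;> simp [pyB_loop] <;> try omega

-- stepping by |a| keeps x % a unchanged
theorem pv_mod_add_abs (x a : Int) (ha : a ≠ 0) :
    PySem.Int.mod (x + |a|) a = PySem.Int.mod x a := by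
  refine pv_mod_unique _ _ _ ha ?_ ?_ ?_
  · have h1 := pv_mod_dvd x a
    have h2 : a ∣ |a| := (dvd_abs a a).mpr dvd_rfl
    have := dvd_add h1 h2
    have e : x - PySem.Int.mod x a + |a| = x + |a| - PySem.Int.mod x a := by ring
    rwa [e] at this
  · exact fun h => (pv_mod_bounds x a).1 h
  · exact fun h => (pv_mod_bounds x a).2 h

-- if x % a = rem_a and y % a = rem_a then a divides y - x
theorem pv_aligned_dvd (x y a rem_a : Int)
    (hx : PySem.Int.mod x a = rem_a) (hy : PySem.Int.mod y a = rem_a) : a ∣ (y - x) := by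
  have h1 := pv_mod_dvd x a
  have h2 := pv_mod_dvd y a
  rw [hx] at h1; rw [hy] at h2
  have := dvd_sub h2 h1
  have e : (y - rem_a) - (x - rem_a) = y - x := by ring
  rwa [e] at this

-- the two loops agree from an aligned position on
theorem pv_sync (n a rem_a b rem_b : Int) (ha : a ≠ 0) :
    ∀ (fuel : Nat) (x : Int), PySem.Int.mod x a = rem_a → x ≤ n + 1000 →
      n + 1001 ≤ x + fuel * |a| →
      pyA_loop n a rem_a b rem_b x = pyB_loop n b rem_b |a| x fuel := by
  have hA : 0 < |a| := abs_pos.mpr ha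
  intro fuel
  induction fuel with
  | zero => intro x _ hx hfuel; simp at hfuel; omega
  | succ fuel ih =>
    intro x hal hx hfuel
    rw [pyB_loop, if_pos hx]
    by_cases hbm : PySem.Int.mod x b = rem_b
    · rw [if_pos hbm, pyA_loop, if_pos ⟨hal, hbm⟩]
    · rw [if_neg hbm, pyA_loop, if_neg (by tauto)]
      by_cases hx1 : x + 1 > n + 1000
      · rw [if_pos hx1, pyB_loop_gt _ _ _ _ _ fuel (by omega)]
      · rw [if_neg hx1]
        have hskip := pyA_skip n a rem_a b rem_b (|a| - 1).toNat (x + 1)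
          (fun j hj heq => by
            have hd : a ∣ ((x + 1 + (j : Int)) - x) := pv_aligned_dvd _ _ _ _ hal heq
            have habs : |a| = (a.natAbs : Int) := Int.abs_eq_natAbs a
            have h0 : (x + 1 + (j : Int)) - x = 0 :=
              Int.eq_zero_of_dvd_of_natAbs_lt_natAbs hd (by omega)
            omega)
          (by omega)
        rw [hskip, show x + 1 + (((|a| - 1).toNat : Nat) : Int) = x + |a| by omega]
        by_cases h2 : x + |a| ≤ n + 1000
        · rw [if_pos h2]
          refine ih (x + |a|) (by rw [pv_mod_add_abs _ _ ha]; exact hal) h2 ?_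
          push_cast at hfuel ⊢
          linarith
        · rw [if_neg h2, pyB_loop_gt _ _ _ _ _ fuel (by omega)]

-- ===== VERDICT (by name: the statement is the Claim_ definition above) =====
theorem find_smallest_number_greater_than_py_spec : Claim_equal_find_smallest_number_greater_than_py := by
  intro n a rem_a b rem_b _ hpre
  obtain ⟨ha, _⟩ := hpre
  have hA : 0 < |a| := abs_pos.mpr ha
  unfold Spec_find_smallest_number_greater_than_py find_smallest_number_greater_than_py
    find_smallest_number_greater_than_py_alt
  by_cases hcan : PySem.Int.mod rem_a a = rem_a
  · rw [if_neg (by simpa using hcan)]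
    set o := PySem.Int.mod (rem_a - (n + 1)) |a| with ho_def
    have ho : 0 ≤ o ∧ o < |a| := (pv_mod_bounds (rem_a - (n + 1)) |a|).1 hA
    have hrb : (0 < a → 0 ≤ rem_a ∧ rem_a < a) ∧ (a < 0 → a < rem_a ∧ rem_a ≤ 0) := by
      have := pv_mod_bounds rem_a a
      rw [hcan] at this; exact this
    have hx0 : PySem.Int.mod ((n + 1) + o) a = rem_a := by
      refine pv_mod_unique _ _ _ ha ?_ hrb.1 hrb.2
      have h1 : |a| ∣ ((rem_a - (n + 1)) - o) := pv_mod_dvd _ _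
      have h2 : |a| ∣ ((n + 1) + o - rem_a) := by
        have := dvd_neg.mpr h1
        have e : -((rem_a - (n + 1)) - o) = (n + 1) + o - rem_a := by ring
        rwa [e] at this
      exact (abs_dvd a _).mp h2
    have hskip := pyA_skip n a rem_a b rem_b o.toNat (n + 1)
      (fun j hj heq => by
        have hd : a ∣ (((n + 1) + o) - ((n + 1) + (j : Int))) := pv_aligned_dvd _ _ _ _ heq hx0
        have habs : |a| = (a.natAbs : Int) := Int.abs_eq_natAbs a
        have h0 : ((n + 1) + o) - ((n + 1) + (j : Int)) = 0 :=
          Int.eq_zero_of_dvd_of_natAbs_lt_natAbs hd (by omega)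
        omega)
      (by omega)
    rw [hskip, show (n + 1) + ((o.toNat : Nat) : Int) = (n + 1) + o by omega]
    by_cases hwin : (n + 1) + o ≤ n + 1000
    · rw [if_pos hwin]
      refine pv_sync n a rem_a b rem_b ha 1001 ((n + 1) + o) hx0 hwin ?_
      have h1 : (1001 : Int) ≤ 1001 * |a| := by nlinarith
      push_cast
      omega
    · rw [if_neg hwin, pyB_loop_gt _ _ _ _ _ 1001 (by omega)]
  · rw [if_pos (by simpa using hcan)]
    have hskip := pyA_skip n a rem_a b rem_b 1000 (n + 1)
      (fun j hj heq => by
        apply hcan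
        refine pv_mod_unique _ _ _ ha (by simp) ?_ ?_
        · intro h
          have := (pv_mod_bounds ((n + 1) + (j : Int)) a).1 h
          rw [heq] at this; exact this
        · intro h
          have := (pv_mod_bounds ((n + 1) + (j : Int)) a).2 h
          rw [heq] at this; exact this)
      (by omega)
    rw [hskip, if_neg (by push_cast; omega)]
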